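-- pv_equiv track=rewrite | github.com/ZafarbekOlimboyev/HomeWorks | 3-dars/gugurt.py | gugurt
-- ===== SOURCE A (Python) =====
-- list_of_gugurt = {"0" : 6, "1" : 2, "235" : 5,"4" : 4, "6" : 6, "7" : 3, "8" : 7, "9" : 6}
--
-- def gugurt(x):
--   s = 0
--   for i in x:
--     if i in "235":
--       s += 5
--     else:
--       s += list_of_gugurt[i]
--   return s
-- ===== SOURCE B (Python) =====
-- def gugurt(x):
--     cost = {"0": 6, "1": 2, "2": 5, "3": 5, "4": 4,
--             "5": 5, "6": 6, "7": 3, "8": 7, "9": 6}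
--     freq = {}
--     for ch in x:
--         freq[ch] = freq.get(ch, 0) + 1
--     return sum(n * cost[ch] for ch, n in freq.items())
-- ===== Notes on version B (the rewrite author's own statement) =====
-- stated objective: idiomatic
-- what changed: B tallies character frequencies in one pass and computes the result as a weighted sum over distinct digits via a flat per-digit cost table, instead of A's per-character scan with a substring membership test plus a lookup in a table keyed by a composite three-digit string.
import Mathlib
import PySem

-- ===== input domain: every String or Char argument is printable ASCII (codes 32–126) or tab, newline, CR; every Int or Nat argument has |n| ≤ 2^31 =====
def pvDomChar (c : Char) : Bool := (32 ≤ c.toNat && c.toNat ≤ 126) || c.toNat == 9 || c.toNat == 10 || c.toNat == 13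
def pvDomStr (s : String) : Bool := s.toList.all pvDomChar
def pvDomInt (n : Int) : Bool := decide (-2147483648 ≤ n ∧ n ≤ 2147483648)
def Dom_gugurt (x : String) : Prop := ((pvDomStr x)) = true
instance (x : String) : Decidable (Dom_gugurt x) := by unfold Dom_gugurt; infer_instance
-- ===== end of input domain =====

-- B replaces A's per-character scan (substring membership test plus a lookup in a table
-- keyed by a composite three-digit string) by a frequency tally followed by a weighted sum
-- over distinct digits with a flat per-digit cost table (idiomatic; same O(n) cost).

-- ===== PORT A =====
def list_of_gugurt : PySem.Dict String Int :=
  PySem.Dict.ofList [("0", 6), ("1", 2), ("235", 5), ("4", 4), ("6", 6), ("7", 3), ("8", 7), ("9", 6)]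

def gugurt (x : String) : Int :=
  x.toList.foldl
    (fun s i =>
      if PySem.Str.isIn (String.ofList [i]) "235" then s + 5
      else s + list_of_gugurt.getD (String.ofList [i]) 0)   -- getD 0: Pre_ excludes the KeyError inputs
    0

-- ===== PORT B =====
def gugurtCost : PySem.Dict Char Int :=
  PySem.Dict.ofList [('0', 6), ('1', 2), ('2', 5), ('3', 5), ('4', 4),
                     ('5', 5), ('6', 6), ('7', 3), ('8', 7), ('9', 6)]

def gugurt_alt (x : String) : Int :=
  let freq := x.toList.foldl (fun d ch => d.insert ch (d.getD ch 0 + 1)) PySem.Dict.empty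
  (freq.items.map (fun p => p.2 * gugurtCost.getD p.1 0)).sum  -- getD 0: Pre_ excludes the KeyError inputs

-- ===== PRECONDITION & SPEC =====
-- Pre_ excludes exactly the strings containing a non-digit character, on which both Pythons raise KeyError.
def Pre_gugurt (x : String) : Prop :=
  (x.toList.all (fun c => ['0', '1', '2', '3', '4', '5', '6', '7', '8', '9'].contains c)) = true
instance (x : String) : Decidable (Pre_gugurt x) := by unfold Pre_gugurt; infer_instance
def pvWitness_gugurt : String := "26"

def Spec_gugurt (x : String) (out : Int) : Prop := out = gugurt_alt x
instance (x : String) (out : Int) : Decidable (Spec_gugurt x out) := by unfold Spec_gugurt; infer_instance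

-- ===== CLAIM (what is proved, stated in full; the proofs are below) =====
def Claim_equal_gugurt : Prop := ∀ (x : String), Dom_gugurt x → Pre_gugurt x → Spec_gugurt x (gugurt x)

-- ===== LEMMAS AND PROOFS =====

-- A's per-character addend, as a function (for the foldl → sum rewrite)
def wA (c : Char) : Int :=
  if PySem.Str.isIn (String.ofList [c]) "235" then 5 else list_of_gugurt.getD (String.ofList [c]) 0

-- B's per-character weight
def wB (c : Char) : Int := gugurtCost.getD c 0

lemma wA_eq_wB_of_digit (c : Char)
    (h : c ∈ ['0', '1', '2', '3', '4', '5', '6', '7', '8', '9']) : wA c = wB c := by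
  fin_cases h <;> decide

-- adding c at one key x of a nodup list shifts the sum by c
lemma sum_map_add_ite (s : List Char) (hnd : s.Nodup) (x : Char) (hx : x ∈ s)
    (g : Char → Int) (c : Int) :
    (s.map (fun k => g k + if k = x then c else 0)).sum = (s.map g).sum + c := by
  induction s with
  | nil => cases hx
  | cons a t ih =>
    rcases List.nodup_cons.mp hnd with ⟨ha, hndt⟩
    rcases List.mem_cons.mp hx with rfl | h
    · simp only [List.map_cons, List.sum_cons]
      have ht : t.map (fun k => g k + if k = x then c else 0) = t.map g := by
        apply List.map_congr_left
        intro k hk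
        have : k ≠ x := fun e => ha (e ▸ hk)
        simp [this]
      rw [ht]; simp only [if_true]; ring
    · have hax : a ≠ x := fun e => ha (e ▸ h)
      simp only [List.map_cons, List.sum_cons, if_neg hax]
      rw [ih hndt h]; ring

-- weighted sum over distinct elements with multiplicities = plain sum over the list
lemma sum_ofList_count (xs : List Char) (f : Char → Int) :
    ((PySem.Set.ofList xs).map (fun k => (xs.count k : Int) * f k)).sum = (xs.map f).sum := by
  induction xs using List.reverseRecOn with
  | nil => simp [PySem.Set.ofList_nil]
  | append_singleton xs x ih =>
    rw [PySem.Set.ofList_append_singleton]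
    by_cases hx : x ∈ xs
    · have hmem : x ∈ PySem.Set.ofList xs := (PySem.Set.mem_ofList xs x).mpr hx
      rw [PySem.Set.add_of_mem hmem]
      have hfun : (PySem.Set.ofList xs).map (fun k => ((xs ++ [x]).count k : Int) * f k)
          = (PySem.Set.ofList xs).map (fun k => (xs.count k : Int) * f k + if k = x then f x else 0) := by
        apply List.map_congr_left
        intro k _
        by_cases hk : k = x
        · subst hk
          simp [List.count_append]; ring
        · have hk' : ¬ x = k := fun e => hk e.symm
          simp [List.count_append, hk, hk']
      rw [hfun, sum_map_add_ite _ (PySem.Set.nodup_ofList xs) x hmem, ih]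
      simp
    · have hmem : x ∉ PySem.Set.ofList xs := fun h => hx ((PySem.Set.mem_ofList xs x).mp h)
      rw [PySem.Set.add_of_not_mem hmem]
      rw [List.map_append, List.sum_append]
      have hfun : (PySem.Set.ofList xs).map (fun k => ((xs ++ [x]).count k : Int) * f k)
          = (PySem.Set.ofList xs).map (fun k => (xs.count k : Int) * f k) := by
        apply List.map_congr_left
        intro k hk
        have h1 : ¬ k = x := fun e => hmem (e ▸ hk)
        have h2 : ¬ x = k := fun e => h1 e.symm
        simp [List.count_append, h2]
      rw [hfun, ih]
      simp [List.count_append, List.count_eq_zero_of_not_mem hx]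

lemma gugurt_eq_sum (x : String) : gugurt x = (x.toList.map wA).sum := by
  unfold gugurt
  rw [show (fun (s : Int) i =>
      if PySem.Str.isIn (String.ofList [i]) "235" then s + 5
      else s + list_of_gugurt.getD (String.ofList [i]) 0) = (fun s i => s + wA i) from ?_]
  · rw [PySem.List.foldl_add]; simp
  · funext s i; unfold wA; split <;> rfl

lemma gugurt_alt_eq_sum (x : String) : gugurt_alt x = (x.toList.map wB).sum := by
  simp only [gugurt_alt, PySem.Dict.foldl_insert_getD_add_one_eq_counter,
    PySem.Dict.items_counter, List.map_map]
  exact sum_ofList_count x.toList wB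

-- ===== VERDICT (by name: the statement is the Claim_ definition above) =====
theorem gugurt_spec : Claim_equal_gugurt := by
  intro x _ hpre
  unfold Spec_gugurt
  rw [gugurt_eq_sum, gugurt_alt_eq_sum]
  congr 1
  refine List.map_congr_left fun c hc => wA_eq_wB_of_digit c ?_
  simpa using List.all_eq_true.mp hpre c hc
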